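-- pv_equiv track=rewrite | github.com/OTOYO1020/ChatDev_Intermediate | WareHouse/B_179_DefaultOrganization_20250503084025/dice_roll.py | check_doublets
-- ===== SOURCE A (Python) =====
-- def check_doublets(dice_rolls):
--     '''
--     Check for consecutive doublets in a list of dice rolls.
--     Parameters:
--     dice_rolls (list of tuples): A list where each tuple contains two integers representing a dice roll.
--     Returns:
--     str: "YES" if there are at least one set of three consecutive doublets, otherwise "NO".
--     '''
--     doublet_count = 0
--     N = len(dice_rolls)
--     for i in range(N - 2):
--         if (dice_rolls[i][0] == dice_rolls[i][1] and
--             dice_rolls[i + 1][0] == dice_rolls[i + 1][1] and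
--             dice_rolls[i + 2][0] == dice_rolls[i + 2][1]):
--             doublet_count += 1
--     return "YES" if doublet_count >= 1 else "NO"
-- ===== SOURCE B (Python) =====
-- def check_doublets(dice_rolls):
--     streak = 0
--     for roll in dice_rolls:
--         if roll[0] == roll[1]:
--             streak += 1
--             if streak >= 3:
--                 return "YES"
--         else:
--             streak = 0
--     return "NO"
-- ===== Notes on version B (the rewrite author's own statement) =====
-- stated objective: simpler
-- what changed: Replaces A's counting of all overlapping three-roll windows (indexed triple test per position) with a single streak counter over the rolls that returns 'YES' as soon as three consecutive doublets are seen.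
import Mathlib
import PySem

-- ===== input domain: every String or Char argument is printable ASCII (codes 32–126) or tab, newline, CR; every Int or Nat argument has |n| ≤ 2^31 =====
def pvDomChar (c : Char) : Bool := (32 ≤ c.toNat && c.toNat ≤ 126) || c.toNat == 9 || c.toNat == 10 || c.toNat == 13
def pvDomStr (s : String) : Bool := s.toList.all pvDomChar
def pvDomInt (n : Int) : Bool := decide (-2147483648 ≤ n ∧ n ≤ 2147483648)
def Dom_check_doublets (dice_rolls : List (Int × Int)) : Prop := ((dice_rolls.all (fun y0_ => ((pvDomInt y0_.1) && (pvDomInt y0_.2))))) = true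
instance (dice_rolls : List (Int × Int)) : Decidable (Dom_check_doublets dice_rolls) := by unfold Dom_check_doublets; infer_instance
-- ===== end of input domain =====

-- B changes the algorithmic decomposition (streak counter with early exit instead of
-- counting overlapping index windows); same return value everywhere, not claimed faster.

-- ===== PORT A =====
-- A counts, for every i in range(N-2), whether rolls i, i+1, i+2 are all doublets,
-- then answers from count >= 1.  The if-condition is the helper windowA; indices are
-- always in range, so the `none` branch (Python's IndexError) is unreachable.
def windowA (dice_rolls : List (Int × Int)) (i : Int) : Bool :=
  match PySem.List.pyGet? dice_rolls i, PySem.List.pyGet? dice_rolls (i + 1),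
        PySem.List.pyGet? dice_rolls (i + 2) with
  | some a, some b, some c => a.1 == a.2 && b.1 == b.2 && c.1 == c.2
  | _, _, _ => false

def check_doublets (dice_rolls : List (Int × Int)) : String :=
  let N : Int := dice_rolls.length
  let doublet_count : Int :=
    (PySem.List.pyRange 0 (N - 2) 1).foldl
      (fun c i => if windowA dice_rolls i then c + 1 else c) 0
  if doublet_count ≥ 1 then "YES" else "NO"

-- ===== PORT B =====
-- B keeps a running streak of consecutive doublets and returns "YES" as soon as it
-- reaches 3 (the early `return` of Source B is the "YES" branch of the recursion).
def altGo : List (Int × Int) → Nat → String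
  | [], _ => "NO"
  | roll :: rest, streak =>
    if roll.1 == roll.2 then
      if streak + 1 ≥ 3 then "YES" else altGo rest (streak + 1)
    else altGo rest 0

def check_doublets_alt (dice_rolls : List (Int × Int)) : String :=
  altGo dice_rolls 0

-- ===== PRECONDITION & SPEC =====
def Spec_check_doublets (dice_rolls : List (Int × Int)) (out : String) : Prop := out = check_doublets_alt dice_rolls
instance (dice_rolls : List (Int × Int)) (out : String) : Decidable (Spec_check_doublets dice_rolls out) := by unfold Spec_check_doublets; infer_instance

-- ===== CLAIM (what is proved, stated in full; the proofs are below) =====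
def Claim_equal_check_doublets : Prop := ∀ (dice_rolls : List (Int × Int)), Dom_check_doublets dice_rolls → Spec_check_doublets dice_rolls (check_doublets dice_rolls)

-- ===== LEMMAS AND PROOFS =====

-- isD p: the roll p is a doublet.
def isD (p : Int × Int) : Bool := p.1 == p.2

-- fr l: length of the maximal doublet prefix of l.
def fr : List (Int × Int) → Nat
  | [] => 0
  | p :: r => if isD p then fr r + 1 else 0

-- W l: some position starts a run of at least three doublets.
def W (l : List (Int × Int)) : Prop := ∃ k : Nat, 3 ≤ fr (l.drop k)

theorem W_nil : ¬ W ([] : List (Int × Int)) := by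
  rintro ⟨k, hk⟩
  simp [List.drop_nil, fr] at hk

theorem W_cons (p : Int × Int) (r : List (Int × Int)) :
    W (p :: r) ↔ 3 ≤ fr (p :: r) ∨ W r := by
  constructor
  · rintro ⟨k, hk⟩
    cases k with
    | zero => exact Or.inl (by simpa using hk)
    | succ k => exact Or.inr ⟨k, by simpa using hk⟩
  · rintro (h | ⟨k, hk⟩)
    · exact ⟨0, by simpa using h⟩
    · exact ⟨k + 1, by simpa using hk⟩

theorem fr3_W (l : List (Int × Int)) (h : 3 ≤ fr l) : W l := ⟨0, by simpa using h⟩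

-- n ≤ fr m iff the first n entries exist and are doublets.
theorem fr_ge_iff (m : List (Int × Int)) (n : Nat) :
    n ≤ fr m ↔ ∀ j < n, ∃ p, m[j]? = some p ∧ isD p = true := by
  induction m generalizing n with
  | nil =>
    cases n with
    | zero => simp [fr]
    | succ n =>
      simp only [fr, List.getElem?_nil]
      constructor
      · omega
      · intro h; rcases h 0 (by omega) with ⟨p, hp, _⟩; cases hp
  | cons p r ih =>
    cases n with
    | zero => simp
    | succ n =>
      by_cases hd : isD p = true
      · simp only [fr, hd, if_pos]
        rw [Nat.succ_le_succ_iff, ih]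
        constructor
        · intro h j hj
          cases j with
          | zero => exact ⟨p, by simp, hd⟩
          | succ j => simpa using h j (by omega)
        · intro h j hj
          simpa using h (j + 1) (by omega)
      · have hfr : fr (p :: r) = 0 := by simp [fr, hd]
        rw [hfr]
        constructor
        · omega
        · intro h
          rcases h 0 (by omega) with ⟨q, hq, hq2⟩
          simp only [List.getElem?_cons_zero, Option.some.injEq] at hq
          subst hq; exact absurd hq2 hd

-- ===== B side: altGo characterised by streak + first run / W =====
theorem altGo_iff (l : List (Int × Int)) (s : Nat) (hs : s < 3) :
    altGo l s = "YES" ↔ 3 ≤ s + fr l ∨ W l := by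
  induction l generalizing s with
  | nil =>
    simp only [altGo, fr]
    constructor
    · intro h; exact absurd h (by decide)
    · rintro (h | h)
      · omega
      · exact absurd h W_nil
  | cons p r ih =>
    by_cases hp : (p.1 == p.2) = true
    · have hfr : fr (p :: r) = fr r + 1 := by simp [fr, isD, hp]
      simp only [altGo]
      rw [if_pos hp, hfr]
      by_cases h3 : s + 1 ≥ 3
      · rw [if_pos h3]
        constructor
        · intro _; left; omega
        · intro _; rfl
      · rw [if_neg h3, ih (s + 1) (by omega), W_cons, hfr]
        constructor
        · rintro (h | h)
          · left; omega
          · right; right; exact h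
        · rintro (h | h | h)
          · left; omega
          · left; omega
          · right; exact h
    · have hfr : fr (p :: r) = 0 := by simp [fr, isD, hp]
      simp only [altGo]
      rw [if_neg hp, ih 0 (by omega), W_cons, hfr]
      constructor
      · rintro (h | h)
        · right; right; exact fr3_W r (by omega)
        · right; right; exact h
      · rintro (h | h | h)
        · omega
        · omega
        · right; exact h

theorem alt_yes_iff (l : List (Int × Int)) : check_doublets_alt l = "YES" ↔ W l := by
  rw [check_doublets_alt, altGo_iff l 0 (by omega)]
  constructor
  · rintro (h | h)
    · exact fr3_W l (by omega)
    · exact h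
  · exact Or.inr

theorem alt_total (l : List (Int × Int)) :
    check_doublets_alt l = "YES" ∨ check_doublets_alt l = "NO" := by
  rw [check_doublets_alt]
  generalize (0 : Nat) = s
  induction l generalizing s with
  | nil => right; rfl
  | cons p r ih =>
    simp only [altGo]
    by_cases hp : (p.1 == p.2) = true
    · rw [if_pos hp]
      by_cases h3 : s + 1 ≥ 3
      · rw [if_pos h3]; left; rfl
      · rw [if_neg h3]; exact ih _
    · rw [if_neg hp]; exact ih _

-- ===== A side: the counting fold is positive iff some window qualifies =====
theorem if_pos_iff_of_ne {p : Prop} [Decidable p] {c d : String} (hne : c ≠ d) :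
    ((if p then c else d) = c ↔ p) := by
  split_ifs with h
  · exact iff_of_true rfl h
  · exact iff_of_false (fun hh => hne hh.symm) h

theorem foldl_pos {P : Int → Bool} (L : List Int) (c : Int) (hc : 0 ≤ c) :
    1 ≤ L.foldl (fun c i => if P i then c + 1 else c) c ↔ 1 ≤ c ∨ ∃ i ∈ L, P i = true := by
  induction L generalizing c with
  | nil => simp
  | cons x L ih =>
    simp only [List.foldl_cons, List.mem_cons]
    by_cases hx : P x = true
    · rw [if_pos hx, ih (c + 1) (by omega)]
      constructor
      · intro _; right; exact ⟨x, Or.inl rfl, hx⟩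
      · intro _; left; omega
    · rw [if_neg hx, ih c hc]
      constructor
      · rintro (h | ⟨i, hi, hPi⟩)
        · left; exact h
        · right; exact ⟨i, Or.inr hi, hPi⟩
      · rintro (h | ⟨i, hi, hPi⟩)
        · left; exact h
        · rcases hi with rfl | hi
          · exact absurd hPi hx
          · right; exact ⟨i, hi, hPi⟩

theorem a_yes_iff (l : List (Int × Int)) : check_doublets l = "YES" ↔ W l := by
  simp only [check_doublets]
  rw [if_pos_iff_of_ne (by decide : ("YES" : String) ≠ "NO"), ge_iff_le,
    foldl_pos _ 0 le_rfl]
  constructor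
  · rintro (h | ⟨i, hi, hPi⟩)
    · omega
    · rw [PySem.List.mem_pyRange_one] at hi
      obtain ⟨hi0, hi2⟩ := hi
      refine ⟨i.toNat, ?_⟩
      rw [fr_ge_iff]
      intro j hj
      have hlen : i.toNat + j < l.length := by omega
      have hj0 : PySem.List.pyGet? l i = some l[i.toNat] := by
        have h := PySem.List.pyGet?_ofNat l i.toNat (by omega)
        rwa [show ((i.toNat : Nat) : Int) = i by omega] at h
      have hj1 : PySem.List.pyGet? l (i + 1) = some l[i.toNat + 1] := by
        have h := PySem.List.pyGet?_ofNat l (i.toNat + 1) (by omega)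
        rwa [show ((i.toNat + 1 : Nat) : Int) = i + 1 by omega] at h
      have hj2 : PySem.List.pyGet? l (i + 2) = some l[i.toNat + 2] := by
        have h := PySem.List.pyGet?_ofNat l (i.toNat + 2) (by omega)
        rwa [show ((i.toNat + 2 : Nat) : Int) = i + 2 by omega] at h
      simp only [windowA, hj0, hj1, hj2, Bool.and_eq_true] at hPi
      refine ⟨l[i.toNat + j], by rw [List.getElem?_drop]; simp [hlen], ?_⟩
      interval_cases j
      · simpa [isD] using hPi.1.1
      · simpa [isD] using hPi.1.2
      · simpa [isD] using hPi.2
  · rintro ⟨k, hk⟩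
    rw [fr_ge_iff] at hk
    obtain ⟨a, ha, hda⟩ := hk 0 (by omega)
    obtain ⟨b, hb, hdb⟩ := hk 1 (by omega)
    obtain ⟨cc, hcc, hdcc⟩ := hk 2 (by omega)
    rw [List.getElem?_drop] at ha hb hcc
    have hlen : k + 2 < l.length := by
      by_contra h
      rw [List.getElem?_eq_none (by omega)] at hcc
      cases hcc
    right
    refine ⟨(k : Int), PySem.List.mem_pyRange_one.mpr ⟨by omega, by omega⟩, ?_⟩
    have h0 : PySem.List.pyGet? l (k : Int) = some l[k] :=
      PySem.List.pyGet?_ofNat l k (by omega)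
    have h1 : PySem.List.pyGet? l ((k : Int) + 1) = some l[k + 1] := by
      have h := PySem.List.pyGet?_ofNat l (k + 1) (by omega)
      rwa [show ((k + 1 : Nat) : Int) = (k : Int) + 1 by omega] at h
    have h2 : PySem.List.pyGet? l ((k : Int) + 2) = some l[k + 2] := by
      have h := PySem.List.pyGet?_ofNat l (k + 2) (by omega)
      rwa [show ((k + 2 : Nat) : Int) = (k : Int) + 2 by omega] at h
    have ea : l[k]? = some a := by simpa using ha
    have eb : l[k + 1]? = some b := by simpa using hb
    have ec : l[k + 2]? = some cc := by simpa using hcc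
    rw [List.getElem?_eq_getElem (by omega)] at ea eb ec
    simp only [windowA, h0, h1, h2, Bool.and_eq_true]
    rw [(Option.some.injEq _ _).mp ea, (Option.some.injEq _ _).mp eb,
      (Option.some.injEq _ _).mp ec]
    simp only [isD] at hda hdb hdcc
    exact ⟨⟨hda, hdb⟩, hdcc⟩

theorem a_total (l : List (Int × Int)) :
    check_doublets l = "YES" ∨ check_doublets l = "NO" := by
  simp only [check_doublets]
  split_ifs
  · left; rfl
  · right; rfl

-- ===== VERDICT (by name: the statement is the Claim_ definition above) =====
theorem check_doublets_spec : Claim_equal_check_doublets := by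
  intro l _
  unfold Spec_check_doublets
  rcases a_total l with hA | hA <;> rcases alt_total l with hB | hB <;>
    rw [hA, hB]
  · exact absurd ((alt_yes_iff l).mpr ((a_yes_iff l).mp hA)) (by rw [hB]; decide)
  · exact absurd ((a_yes_iff l).mpr ((alt_yes_iff l).mp hB)) (by rw [hA]; decide)
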